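-- pv_equiv track=rewrite | github.com/zhanghy-sketchzh/ChatDB | src/chatdb/tools/explore_dimension.py | _extract_where_clause
-- ===== SOURCE A (Python) =====
-- def _extract_where_clause(sql: str) -> str:
--     """从 SQL 中提取 WHERE 子句"""
--     if not sql or "WHERE" not in sql.upper():
--         return ""
--
--     try:
--         start = sql.upper().find("WHERE") + 5
--         end = len(sql)
--         for sep in (" GROUP BY", " ORDER BY", " LIMIT", ";"):
--             i = sql.upper().find(sep, start)
--             if i >= 0:
--                 end = min(end, i)
--         return sql[start:end].strip()
--     except Exception:
--         return ""
-- ===== SOURCE B (Python) =====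
-- def _extract_where_clause(sql: str) -> str:
--     u = sql.upper()
--     k = u.find("WHERE")
--     if k < 0:
--         return ""
--     start = k + 5
--     end = len(sql)
--     for j in range(start, len(sql)):
--         if any(u.startswith(s, j) for s in (" GROUP BY", " ORDER BY", " LIMIT", ";")):
--             end = j
--             break
--     return sql[start:end].strip()
-- ===== Notes on version B (the rewrite author's own statement) =====
-- stated objective: alternative
-- what changed: B replaces A's four independent full find() passes combined by min() with one left-to-right scan from the WHERE clause start that stops at the first position where any separator begins (and folds the emptiness/containment test into a single find).
import Mathlib
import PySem

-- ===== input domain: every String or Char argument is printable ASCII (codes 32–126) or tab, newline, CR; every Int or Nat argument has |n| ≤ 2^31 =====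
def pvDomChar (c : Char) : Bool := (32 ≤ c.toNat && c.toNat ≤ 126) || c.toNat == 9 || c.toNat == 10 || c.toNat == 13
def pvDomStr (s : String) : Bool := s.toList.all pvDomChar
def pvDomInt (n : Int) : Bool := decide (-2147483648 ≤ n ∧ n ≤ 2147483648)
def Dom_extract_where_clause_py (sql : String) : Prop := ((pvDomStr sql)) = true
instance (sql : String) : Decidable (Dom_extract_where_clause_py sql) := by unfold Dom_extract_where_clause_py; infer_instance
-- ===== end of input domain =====

-- B replaces A's four full find() passes combined with min() by one forward scan that stops at
-- the first position where any separator begins; return values are identical (objective: alternative).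

-- ===== PORT A =====
def extract_where_clause_py (sql : String) : String :=
  if PySem.Str.len sql == 0 || !(PySem.Str.isIn "WHERE" (PySem.Str.upper sql)) then ""
  else
    let start : Int := PySem.Str.find (PySem.Str.upper sql) "WHERE" + 5
    let e : Int := [" GROUP BY", " ORDER BY", " LIMIT", ";"].foldl
      (fun e sep =>
        let i := PySem.Str.findFrom (PySem.Str.upper sql) sep start
        if 0 ≤ i then min e i else e)
      (PySem.Str.len sql : Int)
    PySem.Str.strip (PySem.Str.slice sql (some start) (some e))

-- ===== PORT B =====
-- B-side helpers: the separator test at one position ('any(u.startswith(s, j) for s in …)',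
-- exact since 0 ≤ j ≤ len(u)), and the forward scan for the first hit ('for j in range(start, len(sql))')
def pvSepAt (u : List Char) (j : Nat) : Bool :=
  [" GROUP BY", " ORDER BY", " LIMIT", ";"].any (fun s => s.toList.isPrefixOf (u.drop j))

def pvScan (u : List Char) (j : Nat) : Nat :=
  if j < u.length then
    if pvSepAt u j then j else pvScan u (j + 1)
  else u.length
termination_by u.length - j

def extract_where_clause_py_alt (sql : String) : String :=
  let u := PySem.Str.upper sql
  let k := PySem.Str.find u "WHERE"
  if k < 0 then ""
  else
    let start : Nat := k.toNat + 5
    let e : Nat := pvScan u.toList start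
    PySem.Str.strip (PySem.Str.slice sql (some (start : Int)) (some (e : Int)))

-- ===== PRECONDITION & SPEC =====
def Spec_extract_where_clause_py (sql : String) (out : String) : Prop := out = extract_where_clause_py_alt sql
instance (sql : String) (out : String) : Decidable (Spec_extract_where_clause_py sql out) := by unfold Spec_extract_where_clause_py; infer_instance

-- ===== CLAIM (what is proved, stated in full; the proofs are below) =====
def Claim_equal_extract_where_clause_py : Prop := ∀ (sql : String), Dom_extract_where_clause_py sql → Spec_extract_where_clause_py sql (extract_where_clause_py sql)

-- ===== LEMMAS AND PROOFS =====

theorem sepAt_iff (u : List Char) (j : Nat) :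
    pvSepAt u j = true ↔
      ∃ sep ∈ ([" GROUP BY", " ORDER BY", " LIMIT", ";"] : List String), sep.toList <+: u.drop j := by
  simp [pvSepAt, List.isPrefixOf_iff_prefix]

theorem sep_nonempty (sep : String)
    (h : sep ∈ ([" GROUP BY", " ORDER BY", " LIMIT", ";"] : List String)) : sep.toList ≠ [] := by
  fin_cases h <;> decide

-- a prefix at position p ≥ k is an infix of the drop at k
theorem pref_to_infix (u sep : List Char) (k p : Nat) (hk : k ≤ p) (h : sep <+: u.drop p) :
    sep <:+: u.drop k := by
  have hd : u.drop p = (u.drop k).drop (p - k) := by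
    rw [List.drop_drop]; congr 1; omega
  rw [hd] at h
  exact h.isInfix.trans (List.drop_suffix _ _).isInfix

theorem match_lt_length (u sep : List Char) (p : Nat) (hne : sep ≠ []) (h : sep <+: u.drop p) :
    p < u.length := by
  have hl := h.length_le
  simp [List.length_drop] at hl
  have h1 : 0 < sep.length := List.length_pos_of_ne_nil hne
  omega

theorem scan_spec (u : List Char) (j : Nat) :
    pvScan u j = u.length ∨
      (j ≤ pvScan u j ∧ pvScan u j < u.length ∧ pvSepAt u (pvScan u j) = true) := by
  fun_induction pvScan u j with
  | case1 j hlt hsep => right; exact ⟨le_refl _, hlt, hsep⟩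
  | case2 j hlt hsep ih =>
    rcases ih with h | ⟨h1, h2, h3⟩
    · left; exact h
    · right; exact ⟨by omega, h2, h3⟩
  | case3 j hge => left; rfl

theorem scan_min (u : List Char) (j p : Nat) (hp : j ≤ p) (hlt : p < u.length)
    (hm : pvSepAt u p = true) : pvScan u j ≤ p := by
  fun_induction pvScan u j with
  | case1 j hl hsep => exact hp
  | case2 j hl hsep ih =>
    rcases Nat.eq_or_lt_of_le hp with h | h
    · subst h; rw [hm] at hsep; exact absurd rfl hsep
    · exact ih (by omega)
  | case3 j hge => omega

theorem scan_le_of (u : List Char) (st : Nat) : pvScan u st ≤ u.length := by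
  rcases scan_spec u st with h | ⟨_, h, _⟩ <;> omega

theorem fold_le_init (l : List String) (f : String → Int) (init : Int) :
    l.foldl (fun e sep => if 0 ≤ f sep then min e (f sep) else e) init ≤ init := by
  induction l generalizing init with
  | nil => simp
  | cons a t ih =>
    simp only [List.foldl_cons]
    refine le_trans (ih _) ?_
    split_ifs <;> simp

theorem fold_le_mem (l : List String) (f : String → Int) (init : Int)
    (sep : String) (hm : sep ∈ l) (hf : 0 ≤ f sep) :
    l.foldl (fun e s => if 0 ≤ f s then min e (f s) else e) init ≤ f sep := by
  induction l generalizing init with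
  | nil => simp at hm
  | cons a t ih =>
    simp only [List.foldl_cons]
    rcases List.mem_cons.1 hm with h | h
    · subst h
      refine le_trans (fold_le_init _ _ _) ?_
      simp [hf]
    · exact ih _ h

theorem fold_cases (l : List String) (f : String → Int) (init : Int) :
    l.foldl (fun e s => if 0 ≤ f s then min e (f s) else e) init = init ∨
      ∃ sep ∈ l, 0 ≤ f sep ∧ l.foldl (fun e s => if 0 ≤ f s then min e (f s) else e) init = f sep := by
  induction l generalizing init with
  | nil => simp
  | cons a t ih =>
    simp only [List.foldl_cons]
    by_cases ha : 0 ≤ f a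
    · rcases ih (min init (f a)) with h | ⟨s, hs, h0, h⟩
      · simp only [ha, if_true] at h ⊢
        rcases min_cases init (f a) with ⟨he, _⟩ | ⟨he, _⟩
        · left; rw [h, he]
        · right; exact ⟨a, by simp, ha, by rw [h, he]⟩
      · right
        simp only [ha, if_true]
        exact ⟨s, by simp [hs], h0, h⟩
    · rcases ih init with h | ⟨s, hs, h0, h⟩
      · left; simpa [ha] using h
      · right; exact ⟨s, by simp [hs], h0, by simpa [ha] using h⟩

-- A's min-of-finds loop computes exactly B's first-hit scan position
theorem end_eq (u : List Char) (st : Nat) (hst : st ≤ u.length) :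
    ([" GROUP BY", " ORDER BY", " LIMIT", ";"] : List String).foldl
      (fun e sep => if 0 ≤ PySem.Chars.findFrom u sep.toList (st : Int) none
                    then min e (PySem.Chars.findFrom u sep.toList (st : Int) none) else e)
      (u.length : Int) = (pvScan u st : Int) := by
  set f : String → Int := fun sep => PySem.Chars.findFrom u sep.toList (st : Int) none with hf
  apply le_antisymm
  · rcases scan_spec u st with h | ⟨h1, h2, h3⟩
    · rw [h]; exact fold_le_init _ f _
    · rcases (sepAt_iff u (pvScan u st)).1 h3 with ⟨sep, hmem, hpref⟩
      have hinf : sep.toList <:+: u.drop st := pref_to_infix u sep.toList st _ h1 hpref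
      have hne : f sep ≠ -1 := by
        rw [hf]
        intro hc
        exact ((PySem.Chars.findFrom_natCast_eq_neg_one_iff u sep.toList st hst).1 hc) hinf
      obtain ⟨hge, hpf, hmin⟩ := PySem.Chars.findFrom_natCast_spec u sep.toList st hst hne
      have hkey : PySem.Chars.findFrom u sep.toList (st : Int) none = f sep := by rw [hf]
      rw [hkey] at hge hpf hmin
      have h0 : 0 ≤ f sep := le_trans (by exact_mod_cast Nat.zero_le st) hge
      have hle : (f sep).toNat ≤ pvScan u st := by
        rcases Nat.lt_or_ge (pvScan u st) ((f sep).toNat) with hcon | hge2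
        · exact absurd hpref (hmin _ h1 hcon)
        · exact hge2
      refine le_trans (fold_le_mem _ f _ sep hmem h0) ?_
      omega
  · rcases fold_cases ([" GROUP BY", " ORDER BY", " LIMIT", ";"]) f (u.length : Int)
      with h | ⟨sep, hmem, h0, h⟩
    · rw [h]
      exact_mod_cast scan_le_of u st
    · rw [h]
      have hne : f sep ≠ -1 := by omega
      obtain ⟨hge, hpf, hmin⟩ := PySem.Chars.findFrom_natCast_spec u sep.toList st hst hne
      have hkey : PySem.Chars.findFrom u sep.toList (st : Int) none = f sep := by rw [hf]
      rw [hkey] at hge hpf hmin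
      have hlt : (f sep).toNat < u.length :=
        match_lt_length u sep.toList _ (sep_nonempty sep hmem) hpf
      have hstle : st ≤ (f sep).toNat := by omega
      have hsep : pvSepAt u (f sep).toNat = true :=
        (sepAt_iff u _).2 ⟨sep, hmem, hpf⟩
      have := scan_min u st (f sep).toNat hstle hlt hsep
      omega

theorem main_eq (sql : String) : extract_where_clause_py sql = extract_where_clause_py_alt sql := by
  by_cases hin : PySem.Str.isIn "WHERE" (PySem.Str.upper sql) = true
  · -- WHERE present
    have hinf : ("WHERE" : String).toList <:+: (PySem.Str.upper sql).toList :=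
      (PySem.Str.isIn_iff_infix _ _).1 hin
    have hk0 : 0 ≤ PySem.Str.find (PySem.Str.upper sql) "WHERE" := by
      rw [PySem.Str.find_nonneg_iff]; exact hinf
    have hne : sql ≠ "" := by
      intro hnil; subst hnil; exact absurd hin (by decide)
    set k : Int := PySem.Str.find (PySem.Str.upper sql) "WHERE" with hkdef
    set st : Nat := k.toNat + 5 with hstdef
    have hlen : (PySem.Str.upper sql).toList.length = sql.toList.length := by
      simp [PySem.Chars.upper]
    have hcast : k + 5 = (st : Int) := by omega
    have hst : st ≤ (PySem.Str.upper sql).toList.length := by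
      have hfind : 0 ≤ PySem.Chars.find (PySem.Str.upper sql).toList ("WHERE" : String).toList := by
        rw [hkdef] at hk0; rw [PySem.Str.find_eq] at hk0; exact hk0
      obtain ⟨hpf, -⟩ := PySem.Chars.find_spec hfind
      have hll := hpf.length_le
      simp only [List.length_drop] at hll
      have h5 : ("WHERE" : String).toList.length = 5 := by decide
      rw [h5] at hll
      have hkk : k = PySem.Chars.find (PySem.Str.upper sql).toList ("WHERE" : String).toList := by
        rw [hkdef, PySem.Str.find_eq]
      omega
    have hA : (PySem.Str.len sql == 0 || !(PySem.Str.isIn "WHERE" (PySem.Str.upper sql))) = false := by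
      rw [hin]
      simp [PySem.Str.len_eq, hne]
    rw [extract_where_clause_py, extract_where_clause_py_alt]
    rw [hA]
    rw [if_neg (by simp)]
    rw [if_neg (by omega : ¬ k < 0)]
    simp only [PySem.Str.findFrom_eq, PySem.Str.len_eq]
    rw [← hkdef, ← hstdef, hcast, ← hlen]
    rw [end_eq (PySem.Str.upper sql).toList st hst]
  · -- WHERE absent
    have hfneg : PySem.Str.find (PySem.Str.upper sql) "WHERE" = -1 :=
      (PySem.Str.find_eq_neg_one_iff _ _).2 (fun h => hin ((PySem.Str.isIn_iff_infix _ _).2 h))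
    rw [extract_where_clause_py, extract_where_clause_py_alt]
    have hfalse : PySem.Chars.isIn ['W','H','E','R','E'] (PySem.Chars.upper sql.toList) = false := by
      simpa using Bool.eq_false_iff.2 hin
    rw [if_pos (by simp [hfalse]), if_pos (by rw [hfneg]; decide)]

-- ===== VERDICT (by name: the statement is the Claim_ definition above) =====
theorem extract_where_clause_py_spec : Claim_equal_extract_where_clause_py := by
  intro sql _
  exact main_eq sql
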